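-- pv_equiv track=rewrite | github.com/INHA-Algorithm/Algorithm-study | 김창성/구현/상어 초등학교-21608.py | countEmptySeat
-- ===== SOURCE A (Python) =====
-- def countEmptySeat(N, classSeat, BestSeat):
--     maxCount = 0
--     maxCountSeat = []
--
--     for i, j in BestSeat:
--         EmptySeatNum = 0
--
--         for dx, dy in [(0,-1),(-1,0),(0,1),(1,0)]:
--             nx, ny = i+dx, j+dy
--
--             if N > nx >= 0 and N > ny >= 0 and classSeat[nx][ny] == 0:
--                 EmptySeatNum += 1
--
--         if EmptySeatNum > maxCount:
--             maxCount = EmptySeatNum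
--             maxCountSeat = []
--             maxCountSeat.append((i,j))
--         elif EmptySeatNum == maxCount:
--             maxCountSeat.append((i,j))
--
--     return maxCountSeat
-- ===== SOURCE B (Python) =====
-- def countEmptySeat(N, classSeat, BestSeat):
--     def empties(i, j):
--         c = 0
--         for dx, dy in ((0, -1), (-1, 0), (0, 1), (1, 0)):
--             nx, ny = i + dx, j + dy
--             if N > nx >= 0 and N > ny >= 0 and classSeat[nx][ny] == 0:
--                 c += 1
--         return c
--
--     counts = [((i, j), empties(i, j)) for i, j in BestSeat]
--     best = max((c for _, c in counts), default=0)
--     return [s for s, c in counts if c == best]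
-- ===== Notes on version B (the rewrite author's own statement) =====
-- stated objective: alternative
-- what changed: Replaces the single-pass running-max with tie-list reset/append by a build-then-select decomposition: first a table of (seat, empty-neighbor count) pairs, then the maximum count (default 0), then a filter of seats attaining it.
import Mathlib
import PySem

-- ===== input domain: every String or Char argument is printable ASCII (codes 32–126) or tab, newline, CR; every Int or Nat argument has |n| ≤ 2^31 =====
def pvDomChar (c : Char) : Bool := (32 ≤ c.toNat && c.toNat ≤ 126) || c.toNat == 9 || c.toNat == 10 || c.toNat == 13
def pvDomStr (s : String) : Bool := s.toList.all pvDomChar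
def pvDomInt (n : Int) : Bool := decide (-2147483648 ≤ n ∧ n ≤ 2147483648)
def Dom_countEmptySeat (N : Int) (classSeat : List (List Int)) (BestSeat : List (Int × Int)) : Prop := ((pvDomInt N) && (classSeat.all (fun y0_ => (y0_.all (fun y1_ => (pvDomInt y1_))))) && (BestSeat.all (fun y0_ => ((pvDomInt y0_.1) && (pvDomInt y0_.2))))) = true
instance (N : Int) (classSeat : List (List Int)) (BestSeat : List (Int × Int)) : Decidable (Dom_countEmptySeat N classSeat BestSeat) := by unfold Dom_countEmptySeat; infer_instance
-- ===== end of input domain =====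

-- B replaces A's running-max/tie-list loop by a build-table-then-select decomposition (same cost, different structure).


-- The 4 neighbour directions, shared literal of both Pythons
def pvDirs : List (Int × Int) := [(0, -1), (-1, 0), (0, 1), (1, 0)]

-- classSeat[nx][ny] == 0 (only called with 0 ≤ nx, ny by the guard); exact via PySem.List.pyGet?
def pvCellZero (classSeat : List (List Int)) (nx ny : Int) : Bool :=
  match PySem.List.pyGet? classSeat nx with
  | some row =>
    match PySem.List.pyGet? row ny with
    | some v => v == 0
    | none => false
  | none => false

-- the inner 4-direction loop, identical in both Pythons (A inline, B as helper `empties`)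
def pvNbr (N : Int) (classSeat : List (List Int)) (i j : Int) : Int :=
  pvDirs.foldl (fun acc d =>
    let nx := i + d.1
    let ny := j + d.2
    if N > nx ∧ nx ≥ 0 ∧ N > ny ∧ ny ≥ 0 ∧ pvCellZero classSeat nx ny then acc + 1 else acc) 0

-- ===== PORT A =====
def countEmptySeat (N : Int) (classSeat : List (List Int)) (BestSeat : List (Int × Int)) : List (Int × Int) :=
  (BestSeat.foldl (fun (st : Int × List (Int × Int)) s =>
      let c := pvNbr N classSeat s.1 s.2
      if c > st.1 then (c, [s])
      else if c == st.1 then (st.1, st.2 ++ [s])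
      else st)
    (0, [])).2

-- ===== PORT B =====
def countEmptySeat_alt (N : Int) (classSeat : List (List Int)) (BestSeat : List (Int × Int)) : List (Int × Int) :=
  let counts := BestSeat.map (fun s => (s, pvNbr N classSeat s.1 s.2))
  let best := counts.foldl (fun a p => max a p.2) 0
  (counts.filter (fun p => p.2 == best)).map Prod.fst

-- ===== PRECONDITION & SPEC =====
-- Pre_ excludes exactly the inputs on which the Python raises IndexError: a guarded
-- neighbour (nx, ny) with 0 ≤ nx < N and 0 ≤ ny < N lying outside classSeat's actual shape.
def Pre_countEmptySeat (N : Int) (classSeat : List (List Int)) (BestSeat : List (Int × Int)) : Prop :=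
  ∀ p ∈ BestSeat, ∀ d ∈ pvDirs,
    (0 ≤ p.1 + d.1 ∧ p.1 + d.1 < N ∧ 0 ≤ p.2 + d.2 ∧ p.2 + d.2 < N) →
      (p.1 + d.1 < (classSeat.length : Int) ∧
       p.2 + d.2 < ((classSeat.getD (p.1 + d.1).toNat []).length : Int))
instance (N : Int) (classSeat : List (List Int)) (BestSeat : List (Int × Int)) : Decidable (Pre_countEmptySeat N classSeat BestSeat) := by unfold Pre_countEmptySeat; infer_instance

def pvWitness_countEmptySeat : Int × List (List Int) × (List (Int × Int)) :=
  (2, [[0, 1], [1, 0]], [(0, 0), (1, 1)])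

def Spec_countEmptySeat (N : Int) (classSeat : List (List Int)) (BestSeat : List (Int × Int)) (out : List (Int × Int)) : Prop := out = countEmptySeat_alt N classSeat BestSeat
instance (N : Int) (classSeat : List (List Int)) (BestSeat : List (Int × Int)) (out : List (Int × Int)) : Decidable (Spec_countEmptySeat N classSeat BestSeat out) := by unfold Spec_countEmptySeat; infer_instance

-- ===== CLAIM (what is proved, stated in full; the proofs are below) =====
def Claim_equal_countEmptySeat : Prop := ∀ (N : Int) (classSeat : List (List Int)) (BestSeat : List (Int × Int)), Dom_countEmptySeat N classSeat BestSeat → Pre_countEmptySeat N classSeat BestSeat → Spec_countEmptySeat N classSeat BestSeat (countEmptySeat N classSeat BestSeat)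

-- ===== LEMMAS AND PROOFS =====

-- abbreviations for the proof
def pvMaxC (cnt : (Int × Int) → Int) (l : List (Int × Int)) : Int :=
  l.foldl (fun a s => max a (cnt s)) 0

lemma pvFoldlMax_init_le (cnt : (Int × Int) → Int) (l : List (Int × Int)) :
    ∀ a : Int, a ≤ l.foldl (fun b s => max b (cnt s)) a := by
  induction l with
  | nil => intro a; simp
  | cons x t ih =>
    intro a
    exact le_trans (le_max_left a (cnt x)) (ih (max a (cnt x)))

lemma pvMem_le_foldlMax (cnt : (Int × Int) → Int) (l : List (Int × Int)) :
    ∀ a : Int, ∀ s ∈ l, cnt s ≤ l.foldl (fun b s => max b (cnt s)) a := by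
  induction l with
  | nil => intro a s hs; simp at hs
  | cons x t ih =>
    intro a s hs
    rcases List.mem_cons.mp hs with hs | hs
    · subst hs
      exact le_trans (le_max_right a (cnt s)) (pvFoldlMax_init_le cnt t _)
    · exact ih _ s hs

lemma pvMem_le_maxC (cnt : (Int × Int) → Int) (l : List (Int × Int)) :
    ∀ s ∈ l, cnt s ≤ pvMaxC cnt l :=
  pvMem_le_foldlMax cnt l 0

lemma pvMaxC_concat (cnt : (Int × Int) → Int) (l : List (Int × Int)) (x : Int × Int) :
    pvMaxC cnt (l ++ [x]) = max (pvMaxC cnt l) (cnt x) := by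
  simp [pvMaxC, List.foldl_append]

-- A's loop computes (max count, seats of the prefix attaining it, in order)
lemma pvLoop_inv (cnt : (Int × Int) → Int) (l : List (Int × Int)) :
    l.foldl (fun (st : Int × List (Int × Int)) s =>
        let c := cnt s
        if c > st.1 then (c, [s])
        else if c == st.1 then (st.1, st.2 ++ [s])
        else st) (0, [])
      = (pvMaxC cnt l, l.filter (fun s => cnt s == pvMaxC cnt l)) := by
  induction l using List.reverseRecOn with
  | nil => simp [pvMaxC]
  | append_singleton l x ih =>
    rw [List.foldl_append, ih, pvMaxC_concat]
    simp only [List.foldl_cons, List.foldl_nil, List.filter_append]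
    by_cases hgt : cnt x > pvMaxC cnt l
    · have hmax : max (pvMaxC cnt l) (cnt x) = cnt x := max_eq_right (le_of_lt hgt)
      have hnil : l.filter (fun s => cnt s == cnt x) = [] := by
        apply List.filter_eq_nil_iff.mpr
        intro s hs
        have := pvMem_le_maxC cnt l s hs
        simp only [beq_iff_eq]
        omega
      simp [hgt, hmax, hnil]
    · by_cases heq : cnt x = pvMaxC cnt l
      · have hmax : max (pvMaxC cnt l) (cnt x) = pvMaxC cnt l := max_eq_left (le_of_eq heq)
        simp [heq]
      · have hlt : cnt x < pvMaxC cnt l := by omega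
        have hmax : max (pvMaxC cnt l) (cnt x) = pvMaxC cnt l := max_eq_left (le_of_lt hlt)
        simp [heq, hmax, hgt]

-- ===== VERDICT (by name: the statement is the Claim_ definition above) =====
theorem countEmptySeat_spec : Claim_equal_countEmptySeat := by
  intro N classSeat BestSeat _ _
  unfold Spec_countEmptySeat countEmptySeat countEmptySeat_alt
  rw [pvLoop_inv (fun s => pvNbr N classSeat s.1 s.2) BestSeat]
  simp only [List.foldl_map, List.filter_map, List.map_map, pvMaxC]
  rw [show (Prod.fst ∘ fun s : Int × Int => (s, pvNbr N classSeat s.1 s.2)) = id from rfl,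
      List.map_id]
  rfl
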